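-- pv_equiv track=rewrite | github.com/HolyJack/StaticCodeAnalyzer | code_analyzer.py | find_comment_pos
-- ===== SOURCE A (Python) =====
-- def find_comment_pos(line):
--     quote, ignore, skip = None, False, False
--
--     for i, c in enumerate(line):
--         if skip:
--             skip = False
--             continue
--
--         if c == '\\':
--             skip = True
--             continue
--
--         if not ignore and (c == '"' or c == "'"):
--             quote, ignore = c, True
--         elif not ignore and c == '#':
--             return i
--         elif ignore and c == quote:
--             quote, ignore = None, False
--
--     return -1
-- ===== SOURCE B (Python) =====
-- def _skip_string(line, i, q):
--     # consume the body of a quoted string starting at i (after the opening quote);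
--     # return the index just past the closing quote, or len(line) if unterminated
--     n = len(line)
--     while i < n:
--         c = line[i]
--         if c == '\\':
--             i += 2
--         elif c == q:
--             return i + 1
--         else:
--             i += 1
--     return n
--
--
-- def find_comment_pos(line):
--     n = len(line)
--     i = 0
--     while i < n:
--         c = line[i]
--         if c == '\\':
--             i += 2
--         elif c == '#':
--             return i
--         elif c == '"' or c == "'":
--             i = _skip_string(line, i + 1, c)
--         else:
--             i += 1
--     return -1
-- ===== Notes on version B (the rewrite author's own statement) =====
-- stated objective: alternative
-- what changed: Replaced A's single character-by-character loop with three mutable state flags (quote/ignore/skip) by a two-level scanner: an outer token loop that consumes escaped pairs two characters at a time and delegates whole quoted strings to a dedicated _skip_string subroutine, with no state flags.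
import Mathlib
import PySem

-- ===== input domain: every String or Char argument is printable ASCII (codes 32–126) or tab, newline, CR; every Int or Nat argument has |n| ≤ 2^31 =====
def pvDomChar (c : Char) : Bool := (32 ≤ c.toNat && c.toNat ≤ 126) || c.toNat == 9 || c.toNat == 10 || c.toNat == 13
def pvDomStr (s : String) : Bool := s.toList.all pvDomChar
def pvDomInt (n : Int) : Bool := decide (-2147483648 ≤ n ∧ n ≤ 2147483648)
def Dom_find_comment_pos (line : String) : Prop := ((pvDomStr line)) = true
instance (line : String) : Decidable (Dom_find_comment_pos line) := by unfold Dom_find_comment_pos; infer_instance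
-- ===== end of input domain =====

-- B replaces A's single loop with three mutable state flags by a two-level scanner
-- (outer token loop + a subroutine consuming a whole quoted string); objective: alternative.

-- ===== PORT A =====
-- A's loop: state (quote, ignore, skip), one character per step, early return on '#'.
def pvFindA : List Char → Nat → Option Char → Bool → Bool → Int
  | [], _, _, _, _ => -1
  | c :: rest, i, quote, ignore, skip =>
    if skip then pvFindA rest (i + 1) quote ignore false
    else if c = '\\' then pvFindA rest (i + 1) quote ignore true
    else if !ignore && (c = '"' ∨ c = '\'') then pvFindA rest (i + 1) (some c) true skip
    else if !ignore && c = '#' then (i : Int)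
    else if ignore && quote = some c then pvFindA rest (i + 1) none false skip
    else pvFindA rest (i + 1) quote ignore skip
def find_comment_pos (line : String) : Int := pvFindA line.toList 0 none false false

-- ===== PORT B =====
-- Source B's _skip_string: consume the string body after the opening quote q; returns the
-- index just past the closing quote (or end of line) with the unconsumed remainder.
def pvSkipStr (q : Char) : List Char → Nat → Nat × List Char
  | [], i => (i, [])
  | c :: rest, i =>
    if c = '\\' then
      match rest with
      | [] => (i + 2, [])
      | _ :: rest' => pvSkipStr q rest' (i + 2)
    else if c = q then (i + 1, rest)
    else pvSkipStr q rest (i + 1)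
theorem pvSkipStr_len (q : Char) : ∀ (cs : List Char) (i : Nat), (pvSkipStr q cs i).2.length ≤ cs.length
  | [], _ => Nat.le_refl _
  | c :: rest, i => by
    unfold pvSkipStr
    split
    · split
      · simp
      · exact le_trans (pvSkipStr_len q _ (i + 2)) (by simp only [List.length_cons]; omega)
    · split
      · simp
      · exact le_trans (pvSkipStr_len q rest (i + 1)) (by simp only [List.length_cons]; omega)
-- Source B's outer while loop
def pvAltMain : List Char → Nat → Int
  | [], _ => -1
  | c :: rest, i =>
    if c = '\\' then
      match rest with
      | [] => -1
      | _ :: rest' => pvAltMain rest' (i + 2)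
    else if c = '#' then (i : Int)
    else if c = '"' ∨ c = '\'' then
      let p := pvSkipStr c rest (i + 1)
      pvAltMain p.2 p.1
    else pvAltMain rest (i + 1)
termination_by cs _ => cs.length
decreasing_by
  · simp
  · exact Nat.lt_succ_of_le (pvSkipStr_len c rest (i + 1))
  · simp


def find_comment_pos_alt (line : String) : Int := pvAltMain line.toList 0

-- ===== PRECONDITION & SPEC =====
def Spec_find_comment_pos (line : String) (out : Int) : Prop := out = find_comment_pos_alt line
instance (line : String) (out : Int) : Decidable (Spec_find_comment_pos line out) := by unfold Spec_find_comment_pos; infer_instance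

-- ===== CLAIM (what is proved, stated in full; the proofs are below) =====
def Claim_equal_find_comment_pos : Prop := ∀ (line : String), Dom_find_comment_pos line → Spec_find_comment_pos line (find_comment_pos line)

-- ===== LEMMAS AND PROOFS =====

-- Joint invariant: outside a string A's state is (none,false,false) and matches B's outer
-- loop; inside a string opened by q it is (some q,true,false) and matches B's subroutine.
theorem pv_both (n : Nat) : ∀ (cs : List Char), cs.length ≤ n → ∀ (i : Nat),
    (pvFindA cs i none false false = pvAltMain cs i) ∧
    (∀ q : Char, pvFindA cs i (some q) true false =
        pvAltMain (pvSkipStr q cs i).2 (pvSkipStr q cs i).1) := by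
  induction n with
  | zero =>
    intro cs hlen i
    have : cs = [] := List.length_eq_zero_iff.mp (Nat.le_zero.mp hlen)
    subst this
    simp [pvFindA, pvAltMain, pvSkipStr]
  | succ n ih =>
    intro cs hlen i
    match cs with
    | [] => simp [pvFindA, pvAltMain, pvSkipStr]
    | c :: rest =>
      have hr : rest.length ≤ n := by simpa using hlen
      constructor
      · by_cases hb : c = '\\'
        · subst hb
          match rest with
          | [] => rw [pvAltMain]; simp [pvFindA]
          | d :: rest' =>
            have h2 : rest'.length ≤ n := le_trans (by simp) hr
            rw [pvAltMain]
            simp only [pvFindA, reduceIte, Bool.false_eq_true, if_false]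
            exact (ih rest' h2 (i + 2)).1
        · by_cases hq : c = '"' ∨ c = '\''
          · have hh : c ≠ '#' := by rcases hq with h | h <;> subst h <;> decide
            rw [pvAltMain.eq_def]
            simp only [pvFindA, hb, hq, hh, decide_true, decide_false, Bool.not_false,
              Bool.true_and, if_true, if_false, Bool.false_eq_true, reduceIte]
            exact (ih rest hr (i + 1)).2 c
          · by_cases hh : c = '#'
            · subst hh
              rw [pvAltMain.eq_def]; simp [pvFindA]
            · rw [pvAltMain.eq_def]
              simp only [pvFindA, hb, hq, hh, decide_false, Bool.not_false, Bool.true_and,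
                Bool.false_and, Bool.false_eq_true, if_false, reduceIte]
              exact (ih rest hr (i + 1)).1
      · intro q
        by_cases hb : c = '\\'
        · subst hb
          match rest with
          | [] => simp [pvFindA, pvAltMain, pvSkipStr]
          | d :: rest' =>
            have h2 : rest'.length ≤ n := le_trans (by simp) hr
            rw [pvSkipStr]
            simp only [pvFindA, reduceIte, Bool.false_eq_true, if_false]
            exact (ih rest' h2 (i + 2)).2 q
        · by_cases hc : c = q
          · subst hc
            rw [pvSkipStr.eq_def]
            simp only [pvFindA, hb, Bool.not_true, Bool.false_and, Bool.false_eq_true,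
              if_false, decide_true, Bool.true_and, if_true, reduceIte]
            exact (ih rest hr (i + 1)).1
          · have hqc : ¬ ((some q : Option Char) = some c) := by
              simpa using fun h => hc h.symm
            rw [pvSkipStr.eq_def]
            simp only [pvFindA, hb, hc, hqc, Bool.not_true, Bool.false_and,
              Bool.false_eq_true, if_false, decide_false, Bool.true_and, reduceIte]
            exact (ih rest hr (i + 1)).2 q

-- ===== VERDICT (by name: the statement is the Claim_ definition above) =====
theorem find_comment_pos_spec : Claim_equal_find_comment_pos := by
  intro line _
  unfold Spec_find_comment_pos find_comment_pos find_comment_pos_alt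
  exact (pv_both line.toList.length line.toList le_rfl 0).1
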